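-- pv_equiv track=rewrite | github.com/AngusMonroe/zh-NER | en-NER/tagger_top_lookup/evaluate_util.py | parse
-- ===== SOURCE A (Python) =====
-- def parse(tags):
--     filter_ = []
--     current_str = ''
--     last_tag = ''
--     for raw, tag in tags:
--         if tag == 'O':
--             if len(current_str) > 0:
--                 filter_.append((current_str, last_tag))
--                 current_str = ''
--                 last_tag = ''
--             continue
--         elif tag[2:] == last_tag:
--             current_str += ' ' + raw
--         else:
--             if len(current_str) > 0:
--                 filter_.append((current_str, last_tag))
--             last_tag = tag[2:]
--             current_str = raw
--     if len(current_str) > 0: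
--         filter_.append((current_str, last_tag))
--     return filter_
-- ===== SOURCE B (Python) =====
-- def _grouped(tags):
--     """Split the tag sequence into maximal runs of equal entity key
--     (key = None for 'O', else the type after the 2-char prefix)."""
--     groups = []
--     i, n = 0, len(tags)
--     while i < n:
--         key = None if tags[i][1] == 'O' else tags[i][1][2:]
--         raws = []
--         while i < n and (None if tags[i][1] == 'O' else tags[i][1][2:]) == key:
--             raws.append(tags[i][0])
--             i += 1
--         groups.append((key, raws))
--     return groups
--
--
-- def parse(tags):
--     out = []
--     cur, last = '', ''
--     for key, raws in _grouped(tags):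
--         if key is None:
--             if cur:
--                 out.append((cur, last))
--                 cur, last = '', ''
--         elif key == last:
--             cur = ' '.join([cur, *raws])
--         else:
--             if cur:
--                 out.append((cur, last))
--             cur, last = ' '.join(raws), key
--     if cur:
--         out.append((cur, last))
--     return out
-- ===== Notes on version B (the rewrite author's own statement) =====
-- stated objective: idiomatic
-- what changed: Replaces A's per-token current_str/last_tag state machine with a two-pass group-then-join: first split the sequence into maximal runs of equal entity key ('O' mapped to None), then fold over whole groups, building each span with ' '.join instead of character-level string accumulation.
import Mathlib
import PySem

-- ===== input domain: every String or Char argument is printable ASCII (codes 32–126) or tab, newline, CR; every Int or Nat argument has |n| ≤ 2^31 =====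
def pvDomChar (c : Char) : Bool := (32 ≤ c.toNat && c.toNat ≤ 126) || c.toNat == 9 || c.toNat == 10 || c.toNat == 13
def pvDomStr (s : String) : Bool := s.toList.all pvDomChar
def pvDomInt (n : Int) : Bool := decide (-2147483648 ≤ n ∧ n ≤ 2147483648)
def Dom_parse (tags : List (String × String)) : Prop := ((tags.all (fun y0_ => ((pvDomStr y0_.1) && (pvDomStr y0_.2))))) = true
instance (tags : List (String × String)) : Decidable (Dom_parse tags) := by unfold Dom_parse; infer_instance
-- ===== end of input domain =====

-- B replaces A's per-token current_str/last_tag state machine with a two-pass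
-- group-then-join: split into maximal runs of equal entity key, then fold over
-- whole groups; same O(n) cost, different decomposition.

-- ===== PORT A =====
-- the loop 'for raw, tag in tags' with state (filter_, current_str, last_tag), plus the final flush
def parseGo : List (String × String) → List (String × String) → String → String → List (String × String)
  | [], filt, cur, lt => if 0 < PySem.Str.len cur then filt ++ [(cur, lt)] else filt
  | (raw, tag) :: rest, filt, cur, lt =>
    if tag = "O" then
      if 0 < PySem.Str.len cur then parseGo rest (filt ++ [(cur, lt)]) "" ""
      else parseGo rest filt cur lt
    else if PySem.Str.slice tag (some 2) none = lt then
      parseGo rest filt (cur ++ " " ++ raw) lt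
    else if 0 < PySem.Str.len cur then
      parseGo rest (filt ++ [(cur, lt)]) raw (PySem.Str.slice tag (some 2) none)
    else
      parseGo rest filt raw (PySem.Str.slice tag (some 2) none)

def parse (tags : List (String × String)) : List (String × String) := parseGo tags [] "" ""

-- ===== PORT B =====
-- Source B's entity key: None for 'O', else tag[2:]
def keyOfB (t : String) : Option String := if t = "O" then none else some (PySem.Str.slice t (some 2) none)

-- Source B's inner while loop of _grouped: the raws of the current run plus the remainder
def grabB (k : Option String) : List (String × String) → List String × List (String × String)
  | [] => ([], [])
  | (r, t) :: rest =>
    if keyOfB t = k then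
      let p := grabB k rest
      (r :: p.1, p.2)
    else ([], (r, t) :: rest)

theorem grabB_length_le (k : Option String) (l : List (String × String)) :
    (grabB k l).2.length ≤ l.length := by
  induction l with
  | nil => simp [grabB]
  | cons hd rest ih =>
    obtain ⟨r, t⟩ := hd
    simp only [grabB]
    split_ifs
    · exact le_trans ih (by simp)
    · simp

-- Source B's _grouped: maximal runs of equal key
def groupedB : List (String × String) → List (Option String × List String)
  | [] => []
  | (r, t) :: rest =>
    let p := grabB (keyOfB t) rest
    (keyOfB t, r :: p.1) :: groupedB p.2
termination_by l => l.length
decreasing_by exact Nat.lt_succ_of_le (grabB_length_le _ _)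

-- one iteration of Source B's 'for key, raws in _grouped(tags)' over state (out, cur, last)
def stepB (acc : List (String × String) × String × String) (g : Option String × List String) :
    List (String × String) × String × String :=
  match g.1 with
  | none =>
    if acc.2.1 ≠ "" then (acc.1 ++ [(acc.2.1, acc.2.2)], "", "") else acc
  | some key =>
    if key = acc.2.2 then (acc.1, PySem.Str.join " " (acc.2.1 :: g.2), acc.2.2)
    else if acc.2.1 ≠ "" then (acc.1 ++ [(acc.2.1, acc.2.2)], PySem.Str.join " " g.2, key)
    else (acc.1, PySem.Str.join " " g.2, key)

def parse_alt (tags : List (String × String)) : List (String × String) :=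
  let s := (groupedB tags).foldl stepB ([], "", "")
  if s.2.1 ≠ "" then s.1 ++ [(s.2.1, s.2.2)] else s.1

-- ===== PRECONDITION & SPEC =====
def Spec_parse (tags : List (String × String)) (out : List (String × String)) : Prop := out = parse_alt tags
instance (tags : List (String × String)) (out : List (String × String)) : Decidable (Spec_parse tags out) := by unfold Spec_parse; infer_instance

-- ===== CLAIM (what is proved, stated in full; the proofs are below) =====
def Claim_equal_parse : Prop := ∀ (tags : List (String × String)), Dom_parse tags → Spec_parse tags (parse tags)

-- ===== LEMMAS AND PROOFS =====

def finishB (s : List (String × String) × String × String) : List (String × String) :=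
  if s.2.1 ≠ "" then s.1 ++ [(s.2.1, s.2.2)] else s.1

theorem len_pos_iff (s : String) : (0 < PySem.Str.len s) ↔ s ≠ "" := by
  have : s ≠ "" ↔ s.toList ≠ [] := by rw [not_iff_not, String.ext_iff]; simp
  rw [this]
  simp only [PySem.Str.len]
  constructor
  · intro h hnil; simp [hnil] at h
  · intro h; have := List.length_pos_iff.mpr h; omega

theorem join_single (a : String) : PySem.Str.join " " [a] = a := by
  rw [String.ext_iff]
  simp [PySem.Str.toList_join, PySem.Chars.join_singleton]

theorem join_cons_cons (a b : String) (l : List String) :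
    PySem.Str.join " " (a :: b :: l) = PySem.Str.join " " ((a ++ " " ++ b) :: l) := by
  rw [String.ext_iff]
  cases l with
  | nil => simp [PySem.Str.toList_join, PySem.Chars.join_cons_cons, PySem.Chars.join_singleton]
  | cons c l' => simp [PySem.Str.toList_join, PySem.Chars.join_cons_cons]

-- A's loop over a run of 'O' tags from a closed span (current_str = '') is a no-op
theorem orun (ts : List (String × String)) (filt : List (String × String)) (lt : String) :
    parseGo ts filt "" lt = parseGo (grabB none ts).2 filt "" lt := by
  induction ts with
  | nil => simp [grabB]
  | cons hd rest ih =>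
    obtain ⟨r, t⟩ := hd
    by_cases ht : keyOfB t = none
    · have ht' : t = "O" := by
        by_contra h; simp [keyOfB, h] at ht
      rw [grabB, if_pos ht, parseGo, if_pos ht']
      simpa [len_pos_iff] using ih
    · rw [grabB, if_neg ht]

-- A's loop over a run of tags whose key equals last_tag appends ' '+raw per token,
-- i.e. joins the run's raws onto current_str
theorem absorb (key : String) (ts : List (String × String)) :
    ∀ (filt : List (String × String)) (cur : String),
      parseGo ts filt cur key =
        parseGo (grabB (some key) ts).2 filt (PySem.Str.join " " (cur :: (grabB (some key) ts).1)) key := by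
  induction ts with
  | nil => intro filt cur; simp [grabB, join_single]
  | cons hd rest ih =>
    intro filt cur
    obtain ⟨r, t⟩ := hd
    by_cases ht : keyOfB t = some key
    · have ht1 : t ≠ "O" := by
        intro h; simp [keyOfB, h] at ht
      have ht2 : PySem.Str.slice t (some 2) none = key := by
        simpa [keyOfB, ht1] using ht
      rw [grabB, if_pos ht, parseGo, if_neg ht1, if_pos ht2, ih filt (cur ++ " " ++ r)]
      simp [join_cons_cons]
    · rw [grabB, if_neg ht]
      simp [join_single]

-- the main invariant: A's loop from any state = B's fold over the remaining groups
theorem mainInv (l : List (String × String)) :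
    ∀ (filt : List (String × String)) (cur lt : String),
      parseGo l filt cur lt = finishB ((groupedB l).foldl stepB (filt, cur, lt)) := by
  induction hn : l.length using Nat.strong_induction_on generalizing l with
  | _ n ih =>
  match l with
  | [] =>
    intro filt cur lt
    rw [parseGo, groupedB]
    simp only [List.foldl_nil, finishB]
    rw [if_congr (len_pos_iff cur) rfl rfl]
  | (r, t) :: rest =>
    intro filt cur lt
    have IH : ∀ l' : List (String × String), l'.length ≤ rest.length →
        ∀ (filt : List (String × String)) (cur lt : String),
          parseGo l' filt cur lt = finishB ((groupedB l').foldl stepB (filt, cur, lt)) := by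
      intro l' hl'
      exact ih l'.length (by simp at hn; omega) l' rfl
    rw [groupedB]
    simp only [List.foldl_cons]
    by_cases ht : t = "O"
    · have hk : keyOfB t = none := by simp [keyOfB, ht]
      rw [parseGo, if_pos ht]
      by_cases hc : cur = ""
      · subst hc
        rw [if_neg (by simp [PySem.Str.len])]
        rw [orun rest filt lt]
        rw [IH _ (grabB_length_le _ _)]
        simp [stepB, hk]
      · rw [if_pos ((len_pos_iff cur).2 hc)]
        rw [orun rest (filt ++ [(cur, lt)]) ""]
        rw [IH _ (grabB_length_le _ _)]
        simp [stepB, hk, hc]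
    · have hk : keyOfB t = some (PySem.Str.slice t (some 2) none) := by simp [keyOfB, ht]
      rw [parseGo, if_neg ht]
      by_cases hke : PySem.Str.slice t (some 2) none = lt
      · rw [if_pos hke]
        rw [absorb lt rest filt (cur ++ " " ++ r)]
        rw [IH _ (grabB_length_le _ _)]
        simp [stepB, hk, hke, join_cons_cons]
      · rw [if_neg hke]
        by_cases hc : cur = ""
        · subst hc
          rw [if_neg (by simp [PySem.Str.len])]
          rw [absorb _ rest filt r]
          rw [IH _ (grabB_length_le _ _)]
          simp [stepB, hk, hke]
        · rw [if_pos ((len_pos_iff cur).2 hc)]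
          rw [absorb _ rest (filt ++ [(cur, lt)]) r]
          rw [IH _ (grabB_length_le _ _)]
          simp [stepB, hk, hke, hc]

-- ===== VERDICT (by name: the statement is the Claim_ definition above) =====
theorem parse_spec : Claim_equal_parse := by
  intro tags _
  unfold Spec_parse parse parse_alt
  rw [mainInv tags [] "" ""]
  rfl
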